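-- pv_equiv track=rewrite | github.com/pypi-data/pypi-mirror-402 | packages/voicerun_completions/voicerun_completions-0.2.0.tar.gz/voicerun_completions-0.2.0/voicerun_completions/utils/streaming.py | _is_dollar_amount_period
-- ===== SOURCE A (Python) =====
-- def _is_dollar_amount_period(text, period_position):
--     """Check if a period at the given position is a decimal point in a dollar amount.
--
--     Args:
--         text: The full text
--         period_position: The index of the period to check
--
--     Returns:
--         True if the period is part of a dollar amount (e.g., $20.99, $4,000.00), False otherwise
--     """
--     # Check if there's a digit before and after the period
--     has_digit_before = (period_position > 0 and text[period_position - 1].isdigit())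
--     has_digit_after = (period_position < len(text) - 1 and text[period_position + 1].isdigit())
--
--     if not (has_digit_before and has_digit_after):
--         return False
--
--     # Look backward to find if there's a $ before this number
--     # Find the start of the number before the period, skipping digits and commas
--     start_idx = period_position - 1
--     while start_idx > 0 and (text[start_idx - 1].isdigit() or text[start_idx - 1] == ','):
--         start_idx -= 1
--
--     # Check if there's a $ immediately before the number
--     if start_idx > 0 and text[start_idx - 1] == '$':
--         return True
--
--     return False
-- ===== SOURCE B (Python) =====
-- def _is_dollar_amount_period(text, period_position):
--     """Check if a period at the given position is a decimal point in a dollar amount."""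
--     n = len(text)
--     if not (0 < period_position < n - 1):
--         return False
--     if not (text[period_position - 1].isdigit() and text[period_position + 1].isdigit()):
--         return False
--     # Locate the last '$' in the prefix, then validate that everything between it
--     # and the period is a digit/comma run.
--     d = text.rfind('$', 0, period_position)
--     if d < 0:
--         return False
--     return all(c.isdigit() or c == ',' for c in text[d + 1:period_position])
-- ===== Notes on version B (the rewrite author's own statement) =====
-- stated objective: alternative
-- what changed: Instead of A's backward character-by-character scan for the run start, B first locates the last '$' in the prefix with str.rfind and then validates that the whole span between it and the period is a digit/comma run (search-then-validate decomposition).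
import Mathlib
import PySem

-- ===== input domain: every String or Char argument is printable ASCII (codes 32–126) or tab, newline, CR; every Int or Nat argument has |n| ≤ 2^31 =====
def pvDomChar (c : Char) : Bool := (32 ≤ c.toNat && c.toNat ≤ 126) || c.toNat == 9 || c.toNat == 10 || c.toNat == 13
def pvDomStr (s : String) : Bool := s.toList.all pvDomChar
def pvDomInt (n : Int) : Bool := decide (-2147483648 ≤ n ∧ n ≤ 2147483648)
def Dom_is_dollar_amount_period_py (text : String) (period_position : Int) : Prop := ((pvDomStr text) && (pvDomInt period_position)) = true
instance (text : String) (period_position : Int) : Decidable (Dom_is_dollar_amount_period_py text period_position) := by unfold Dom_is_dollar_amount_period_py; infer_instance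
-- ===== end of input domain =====

-- B replaces A's backward run-boundary scan by a search-then-validate decomposition:
-- rfind the last '$' in the prefix, then check the whole span up to the period is digits/commas
-- (objective: alternative; same O(n) cost).

-- ===== PORT A =====
-- the while-loop: start_idx counts down while text[start_idx-1] is a digit or ','
def pvScanBack (cs : List Char) : Nat → Nat
  | 0 => 0
  | k + 1 =>
    match cs[k]? with
    | some c => if PySem.Chars.isdigit c || c == ',' then pvScanBack cs k else k + 1
    | none => k + 1   -- unreachable on inputs A returns on (index always in range there)

def is_dollar_amount_period_py (text : String) (period_position : Int) : Bool :=
  let cs := text.toList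
  let has_digit_before := decide (period_position > 0) &&
    ((PySem.List.pyGet? cs (period_position - 1)).elim false PySem.Chars.isdigit)
  let has_digit_after := decide (period_position < (cs.length : Int) - 1) &&
    ((PySem.List.pyGet? cs (period_position + 1)).elim false PySem.Chars.isdigit)
  if !(has_digit_before && has_digit_after) then false
  else
    let start_idx := pvScanBack cs (period_position - 1).toNat
    if decide (start_idx > 0) && (cs[start_idx - 1]?.elim false (fun c => c == '$')) then true
    else false

-- ===== PORT B =====
def is_dollar_amount_period_py_alt (text : String) (period_position : Int) : Bool :=
  let cs := text.toList
  if !(decide (0 < period_position) && decide (period_position < (cs.length : Int) - 1)) then false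
  else if !(((PySem.List.pyGet? cs (period_position - 1)).elim false PySem.Chars.isdigit) &&
            ((PySem.List.pyGet? cs (period_position + 1)).elim false PySem.Chars.isdigit)) then false
  else
    -- d = text.rfind('$', 0, period_position): last index of '$' in the prefix, -1 if absent
    let d : Int :=
      match (cs.take period_position.toNat).reverse.idxOf? '$' with
      | some k => period_position - 1 - (k : Int)
      | none => -1
    if d < 0 then false
    else
      -- all(c.isdigit() or c == ',' for c in text[d+1:period_position])
      (PySem.List.slice cs (some (d + 1)) (some period_position)).all
        (fun c => PySem.Chars.isdigit c || c == ',')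

-- ===== PRECONDITION & SPEC =====
-- Pre_ excludes exactly the inputs where Python A raises IndexError (period_position beyond the
-- indexable range on either side); everywhere else A returns a bool.
def Pre_is_dollar_amount_period_py (text : String) (period_position : Int) : Prop :=
  period_position ≤ (text.toList.length : Int) ∧ -((text.toList.length : Int) + 1) ≤ period_position
instance (text : String) (period_position : Int) : Decidable (Pre_is_dollar_amount_period_py text period_position) := by unfold Pre_is_dollar_amount_period_py; infer_instance

def pvWitness_is_dollar_amount_period_py : String × Int := ("$20.99", 3)

def Spec_is_dollar_amount_period_py (text : String) (period_position : Int) (out : Bool) : Prop := out = is_dollar_amount_period_py_alt text period_position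
instance (text : String) (period_position : Int) (out : Bool) : Decidable (Spec_is_dollar_amount_period_py text period_position out) := by unfold Spec_is_dollar_amount_period_py; infer_instance

-- ===== CLAIM (what is proved, stated in full; the proofs are below) =====
def Claim_equal_is_dollar_amount_period_py : Prop := ∀ (text : String) (period_position : Int), Dom_is_dollar_amount_period_py text period_position → Pre_is_dollar_amount_period_py text period_position → Spec_is_dollar_amount_period_py text period_position (is_dollar_amount_period_py text period_position)

-- ===== LEMMAS AND PROOFS =====

-- A's while-loop computes: start minus the length of the digit/comma run ending at start-1.
lemma pvScanBack_eq (cs : List Char) (k : Nat) (hk : k ≤ cs.length) :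
    pvScanBack cs k =
      k - (((cs.take k).reverse.takeWhile (fun c => PySem.Chars.isdigit c || c == ',')).length) := by
  induction k with
  | zero => simp [pvScanBack]
  | succ k ih =>
    have hklt : k < cs.length := hk
    have hget : cs[k]? = some cs[k] := List.getElem?_eq_getElem hklt
    have htake : cs.take (k+1) = cs.take k ++ [cs[k]] := by
      rw [List.take_add_one, hget]; rfl
    rw [pvScanBack, hget]
    dsimp only
    by_cases h : PySem.Chars.isdigit cs[k] || cs[k] == ','
    · rw [if_pos h, ih (Nat.le_of_lt hklt), htake]
      have hlen : ((cs.take k).reverse.takeWhile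
          (fun c => PySem.Chars.isdigit c || c == ',')).length ≤ k := by
        calc _ ≤ (cs.take k).reverse.length := (List.takeWhile_sublist _).length_le
        _ = (cs.take k).length := by simp
        _ ≤ k := by simp
      simp only [List.reverse_append, List.reverse_cons, List.reverse_nil, List.nil_append,
        List.cons_append, List.takeWhile_cons, h, if_pos]
      simp only [List.length_cons]
      omega
    · rw [if_neg h, htake]
      simp only [List.reverse_append, List.reverse_cons, List.reverse_nil, List.nil_append,
        List.cons_append, List.takeWhile_cons, h]
      simp

-- search-then-validate on a list l equals 'the char right after the maximal digit/comma prefix is $'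
lemma pvFindCheck (l : List Char) :
    (match l.idxOf? '$' with
     | some k => (l.take k).all (fun c => PySem.Chars.isdigit c || c == ',')
     | none => false)
    = (l[(l.takeWhile (fun c => PySem.Chars.isdigit c || c == ',')).length]? == some '$') := by
  induction l with
  | nil => simp
  | cons c l ih =>
    by_cases hc : c = '$'
    · subst hc
      have hp1 : PySem.Chars.isdigit '$' = false := by decide
      have hp2 : ('$' == ',') = false := by decide
      simp [List.idxOf?_cons, hp1, hp2]
    · have hc' : (c == '$') = false := beq_eq_false_iff_ne.mpr hc
      by_cases hp : (PySem.Chars.isdigit c || (c == ',')) = true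
      · simp only [List.idxOf?_cons, hc', Bool.false_eq_true, if_false,
          List.takeWhile_cons, hp, if_true, List.length_cons, List.getElem?_cons_succ]
        rw [← ih]
        cases h : l.idxOf? '$' with
        | none => simp
        | some k => simp [hp]
      · have hpf : (PySem.Chars.isdigit c || (c == ',')) = false := by
          simpa using hp
        simp only [List.idxOf?_cons, hc', Bool.false_eq_true, if_false,
          List.takeWhile_cons, hpf, List.length_nil, List.getElem?_cons_zero]
        cases h : l.idxOf? '$' with
        | none => simp [hc]
        | some k => simp [hpf, hc]

-- ===== VERDICT (by name: the statement is the Claim_ definition above) =====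
theorem is_dollar_amount_period_py_spec : Claim_equal_is_dollar_amount_period_py := by
  intro text pp _ _
  unfold Spec_is_dollar_amount_period_py is_dollar_amount_period_py is_dollar_amount_period_py_alt
  by_cases h1 : 0 < pp
  case neg => simp [h1]
  by_cases h2 : pp < (text.toList.length : Int) - 1
  case neg =>
    have h2' : (text.length : Int) ≤ pp + 1 := by
      rw [← String.length_toList]; omega
    simp [h1, h2']
  obtain ⟨m, rfl⟩ : ∃ m : Nat, pp = (m : Int) + 1 := ⟨(pp - 1).toNat, by omega⟩
  set cs := text.toList with hcs
  have hmlt : m + 2 < cs.length := by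
    have h2' := h2; push_cast at h2'; omega
  have hg1 : PySem.List.pyGet? cs ((m : Int) + 1 - 1) = some cs[m] := by
    rw [show (m : Int) + 1 - 1 = (m : Int) by ring, PySem.List.pyGet?_natCast]
    exact List.getElem?_eq_getElem (by omega)
  have hg2 : PySem.List.pyGet? cs ((m : Int) + 1 + 1) = some cs[m + 2] := by
    rw [show (m : Int) + 1 + 1 = ((m + 2 : Nat) : Int) by push_cast; ring, PySem.List.pyGet?_natCast]
    exact List.getElem?_eq_getElem (by omega)
  have hgm : cs[m]? = some cs[m] := List.getElem?_eq_getElem (by omega)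
  have hgm2 : cs[m + 2]? = some cs[m + 2] := List.getElem?_eq_getElem (by omega)
  by_cases hd1 : PySem.Chars.isdigit cs[m]
  case neg => simp [hg2, hgm, hd1]
  by_cases hd2 : PySem.Chars.isdigit cs[m + 2]
  case neg => simp [hg2, hgm, hd1, hd2]
  have e2 : decide ((m : Int) + 1 < (cs.length : Int) - 1) = true := decide_eq_true h2
  have e1 : decide ((0 : Int) < (m : Int) + 1) = true := decide_eq_true (by omega)
  have e1' : decide ((m : Int) + 1 > 0) = true := decide_eq_true (by omega)
  simp only [hg1, hg2, hd1, hd2, e1, e2, Option.elim_some,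
    Bool.and_self, Bool.not_true, Bool.false_eq_true, if_false]
  -- A side: start_idx
  rw [show ((m : Int) + 1 - 1).toNat = m by omega]
  rw [pvScanBack_eq cs m (by omega)]
  set p : Char → Bool := fun c => PySem.Chars.isdigit c || c == ',' with hp
  set rev := (cs.take m).reverse with hrev
  set t := (rev.takeWhile p).length with ht
  have hlen_take : (cs.take m).length = m := by simp; omega
  have hrevlen : rev.length = m := by rw [hrev]; simp; omega
  have htm : t ≤ m := by
    rw [ht]
    calc _ ≤ rev.length := (List.takeWhile_sublist _).length_le
    _ = m := hrevlen
  -- A side equals (rev[t]? == some '$')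
  have hA : (if (decide (m - t > 0) && (cs[m - t - 1]?.elim false (fun c => c == '$')))
              then true else false) = (rev[t]? == some '$') := by
    by_cases hlt : t < m
    · have hidx : rev[t]? = cs[m - 1 - t]? := by
        rw [hrev, List.getElem?_reverse (by rw [hlen_take]; omega), hlen_take]
        exact List.getElem?_take_of_lt (by omega)
      have hch : cs[m - 1 - t]? = some cs[m - 1 - t] := List.getElem?_eq_getElem (by omega)
      rw [hidx, hch, show m - t - 1 = m - 1 - t by omega, hch]
      have hpos : decide (m - t > 0) = true := decide_eq_true (by omega)
      simp [hlt, beq_iff_eq]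
      exact (beq_eq_decide _ _).symm
    · have htm' : t = m := by omega
      have hnone : rev[t]? = none := by apply List.getElem?_eq_none; omega
      rw [hnone]
      simp
      exact fun h => absurd h hlt
  rw [hA]
  -- B side
  rw [show ((m : Int) + 1).toNat = m + 1 by omega]
  have htake1 : cs.take (m + 1) = cs.take m ++ [cs[m]] := by
    rw [List.take_add_one, List.getElem?_eq_getElem (by omega : m < cs.length)]; rfl
  have hrev' : (cs.take (m + 1)).reverse = cs[m] :: rev := by rw [htake1]; simp [hrev]
  rw [hrev']
  have hpm : p cs[m] = true := by rw [hp]; simp [hd1]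
  have hkey := pvFindCheck (cs[m] :: rev)
  have ht' : ((cs[m] :: rev).takeWhile p).length = t + 1 := by
    simp [hpm, ht]
  rw [← hp] at hkey
  rw [ht', List.getElem?_cons_succ] at hkey
  -- now case on the idxOf? result
  cases hfind : (cs[m] :: rev).idxOf? '$' with
  | none =>
    simp only [hfind] at hkey
    rw [← hkey]
    norm_num
  | some k =>
    simp only [hfind] at hkey
    have hk : k < m + 1 := by
      obtain ⟨hklt, -⟩ := List.idxOf?_eq_some_iff.mp hfind
      simpa [hrevlen] using hklt
    have hd : ¬ ((m : Int) + 1 - 1 - (k : Int) < 0) := by omega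
    rw [if_neg hd]
    have harg1 : (m : Int) + 1 - 1 - (k : Int) + 1 = ((m - k + 1 : Nat) : Int) := by
      push_cast; omega
    have harg2 : (m : Int) + 1 = ((m + 1 : Nat) : Int) := by push_cast; ring
    rw [harg1, harg2, PySem.List.slice_natCast]
    have hseg : (cs.drop (m - k + 1)).take (m + 1 - (m - k + 1)) = ((cs[m] :: rev).take k).reverse := by
      rw [show m - k + 1 = m + 1 - k by omega, show m + 1 - (m + 1 - k) = k by omega,
          ← hrev', List.take_reverse, List.reverse_reverse, List.length_take,
          show min (m + 1) cs.length = m + 1 from Nat.min_eq_left (by omega), List.drop_take,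
          show m + 1 - (m + 1 - k) = k by omega]
    rw [hseg, List.all_reverse]
    exact hkey.symm
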